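-- pv_equiv track=rewrite | github.com/hyunjun/practice | python/problem-hash/pairs.py | pairs1
-- ===== SOURCE A (Python) =====
-- from collections import defaultdict
--
-- def pairs1(k, arr):
--     d = defaultdict(list)
--     for i, a in enumerate(arr):
--         d[a].append(i)
--     res = set()
--     for i, a in enumerate(arr):
--         for t in [k - a, a - k]:
--             if t in d:
--                 for j in d[t]:
--                     if i == j:
--                         continue
--                     res.add((min(i, j), max(i, j)))
--     return len(res)
-- ===== SOURCE B (Python) =====
-- def pairs1(k, arr):
--     total = 0
--     rest = arr
--     while rest:
--         a, rest = rest[0], rest[1:]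
--         total += sum(1 for b in rest if a + b == k or a - b == k or b - a == k)
--     return total
-- ===== Notes on version B (the rewrite author's own statement) =====
-- stated objective: simpler
-- what changed: Replaces A's value-to-index-list dict plus a deduplicating set of (min,max) index pairs by a single triangular consume-the-list pass that counts each unordered pair once against the sum/difference predicate directly; B is much shorter but always quadratic, whereas A is near-linear when few pairs match.
import Mathlib
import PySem

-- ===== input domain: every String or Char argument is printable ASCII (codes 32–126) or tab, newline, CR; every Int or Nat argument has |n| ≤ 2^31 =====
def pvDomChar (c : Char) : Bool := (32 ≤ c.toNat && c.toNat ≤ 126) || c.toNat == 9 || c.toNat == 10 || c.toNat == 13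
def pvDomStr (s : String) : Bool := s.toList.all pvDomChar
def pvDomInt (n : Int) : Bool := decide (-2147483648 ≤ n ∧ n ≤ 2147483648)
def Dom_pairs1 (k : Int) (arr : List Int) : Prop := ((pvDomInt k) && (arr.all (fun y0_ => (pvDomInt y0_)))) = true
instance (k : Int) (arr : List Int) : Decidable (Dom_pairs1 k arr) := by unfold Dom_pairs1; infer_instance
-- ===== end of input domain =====

-- B replaces A's value→indices dict plus a dedup set of (min,max) index pairs by one
-- triangular consume-the-list pass that counts each unordered pair directly (objective: simpler).

-- ===== PORT A =====
def pairs1 (k : Int) (arr : List Int) : Int :=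
  let d : PySem.Dict Int (List Int) :=
    (PySem.List.enumerate arr 0).foldl
      (fun d p => d.modify p.2 [] (fun l => l ++ [p.1])) PySem.Dict.empty
  let res : PySem.Set (Int × Int) :=
    (PySem.List.enumerate arr 0).foldl
      (fun res p =>
        [k - p.2, p.2 - k].foldl
          (fun res t =>
            if d.contains t then
              (d.getD t []).foldl
                (fun res j =>
                  if p.1 = j then res
                  else PySem.Set.add res (min p.1 j, max p.1 j)) res
            else res) res) PySem.Set.empty
  (PySem.Set.len res : Int)

-- ===== PORT B =====
-- while rest: a, rest = rest[0], rest[1:]; total += sum(1 for b in rest if …)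
-- (rest[0] / rest[1:] of a nonempty list are exactly head / tail, matched structurally)
def pairs1AltGo (k : Int) (rest : List Int) (total : Int) : Int :=
  match rest with
  | [] => total
  | a :: rest' =>
      pairs1AltGo k rest'
        (total + (rest'.countP (fun b => a + b == k || a - b == k || b - a == k) : Int))

def pairs1_alt (k : Int) (arr : List Int) : Int :=
  pairs1AltGo k arr 0

-- ===== PRECONDITION & SPEC =====
def Spec_pairs1 (k : Int) (arr : List Int) (out : Int) : Prop := out = pairs1_alt k arr
instance (k : Int) (arr : List Int) (out : Int) : Decidable (Spec_pairs1 k arr out) := by unfold Spec_pairs1; infer_instance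

-- ===== CLAIM (what is proved, stated in full; the proofs are below) =====
def Claim_equal_pairs1 : Prop := ∀ (k : Int) (arr : List Int), Dom_pairs1 k arr → Spec_pairs1 k arr (pairs1 k arr)

-- ===== LEMMAS AND PROOFS =====

-- the pair predicate (sum = k or difference = k either way), as both programs test it
def pvPred (k a b : Int) : Bool := a + b == k || a - b == k || b - a == k

-- A's dict, named for the proofs (definitionally the one pairs1 builds)
def pvD (arr : List Int) : PySem.Dict Int (List Int) :=
  (PySem.List.enumerate arr 0).foldl
    (fun d p => d.modify p.2 [] (fun l => l ++ [p.1])) PySem.Dict.empty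

-- A's result set, named for the proofs (definitionally the one pairs1 builds)
def pvRes (k : Int) (arr : List Int) : PySem.Set (Int × Int) :=
  (PySem.List.enumerate arr 0).foldl
    (fun res p =>
      [k - p.2, p.2 - k].foldl
        (fun res t =>
          if (pvD arr).contains t then
            ((pvD arr).getD t []).foldl
              (fun res j =>
                if p.1 = j then res
                else PySem.Set.add res (min p.1 j, max p.1 j)) res
          else res) res) PySem.Set.empty

-- B's pair list, mirroring pairs1AltGo's recursion, with absolute index offset s
def pvM (k : Int) (s : Int) : List Int → List (Int × Int)
  | [] => []
  | a :: rest =>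
      ((PySem.List.enumerate rest (s+1)).filter (fun p => pvPred k a p.2)).map
        (fun p => (s, p.1)) ++ pvM k (s+1) rest

lemma pairs1_eq_res (k : Int) (arr : List Int) :
    pairs1 k arr = ((pvRes k arr).length : Int) := rfl

lemma pvD_getD_aux (t : Int) :
    ∀ (xs : List Int) (s : Int) (d0 : PySem.Dict Int (List Int)),
      ((PySem.List.enumerate xs s).foldl
          (fun d p => d.modify p.2 [] (fun l => l ++ [p.1])) d0).getD t [] =
        d0.getD t [] ++ ((PySem.List.enumerate xs s).filter (fun p => p.2 == t)).map (·.1) := by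
  intro xs
  induction xs with
  | nil => intro s d0; simp [PySem.List.enumerate_nil]
  | cons a xs ih =>
      intro s d0
      rw [PySem.List.enumerate_cons]
      simp only [List.foldl_cons, List.filter_cons]
      rw [ih]
      by_cases h : a = t
      · subst h
        simp
      · have hne : (a == t) = false := by simpa using h
        simp only [hne, Bool.false_eq_true, if_false, PySem.Dict.getD_modify]
        rw [if_neg (fun ht => h ht.symm)]

lemma pvD_getD (arr : List Int) (t : Int) :
    (pvD arr).getD t [] =
      ((PySem.List.enumerate arr 0).filter (fun p => p.2 == t)).map (·.1) := by
  unfold pvD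
  rw [pvD_getD_aux t arr 0 PySem.Dict.empty]
  simp [PySem.Dict.getD_empty]

lemma mem_pvD_getD (arr : List Int) (t j : Int) :
    j ∈ (pvD arr).getD t [] ↔
      ∃ (m : Nat) (h : m < arr.length), arr[m] = t ∧ j = (m : Int) := by
  rw [pvD_getD]
  simp only [List.mem_map, List.mem_filter]
  constructor
  · rintro ⟨p, ⟨hp, hpt⟩, rfl⟩
    rcases (PySem.List.mem_enumerate_iff _ _ _).mp hp with ⟨m, hm, rfl⟩
    exact ⟨m, hm, by simpa using hpt, by simp⟩
  · rintro ⟨m, hm, hmt, rfl⟩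
    refine ⟨((m : Int), arr[m]), ⟨?_, by simpa using hmt⟩, rfl⟩
    exact (PySem.List.mem_enumerate_iff _ _ _).mpr ⟨m, hm, by simp⟩

lemma mem_foldl_gen {β : Type} {α : Type} [BEq α] [LawfulBEq α]
    (f : PySem.Set α → β → PySem.Set α) (C : β → α → Prop)
    (hf : ∀ r b x, x ∈ f r b ↔ x ∈ r ∨ C b x) :
    ∀ (l : List β) (r : PySem.Set α) (x), x ∈ l.foldl f r ↔ x ∈ r ∨ ∃ b ∈ l, C b x := by
  intro l
  induction l with
  | nil => intro r x; simp
  | cons b l ih =>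
      intro r x
      simp only [List.foldl_cons, ih, hf, List.mem_cons]
      constructor
      · rintro (⟨h | h⟩ | ⟨b', hb', h⟩)
        · exact Or.inl h
        · exact Or.inr ⟨b, Or.inl rfl, h⟩
        · exact Or.inr ⟨b', Or.inr hb', h⟩
      · rintro (h | ⟨b', hb' | hb', h⟩)
        · exact Or.inl (Or.inl h)
        · exact Or.inl (Or.inr (hb' ▸ h))
        · exact Or.inr ⟨b', hb', h⟩

lemma nodup_foldl_gen {β : Type} {α : Type}
    (f : List α → β → List α)
    (hf : ∀ r b, r.Nodup → (f r b).Nodup) :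
    ∀ (l : List β) (r : List α), r.Nodup → (l.foldl f r).Nodup := by
  intro l
  induction l with
  | nil => intro r h; simpa
  | cons b l ih => intro r h; exact ih _ (hf r b h)

lemma pvRes_step3 (i : Int) (r : PySem.Set (Int × Int)) (j : Int) (y : Int × Int) :
    y ∈ (if i = j then r else PySem.Set.add r (min i j, max i j)) ↔
      y ∈ r ∨ (i ≠ j ∧ y = (min i j, max i j)) := by
  by_cases h : i = j
  · simp [h]
  · simp [h, PySem.Set.mem_add]

lemma pvRes_step2 (arr : List Int) (i : Int) (r : PySem.Set (Int × Int)) (t : Int)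
    (y : Int × Int) :
    y ∈ (if (pvD arr).contains t then
          ((pvD arr).getD t []).foldl
            (fun res j => if i = j then res else PySem.Set.add res (min i j, max i j)) r
        else r) ↔
      y ∈ r ∨ ∃ j ∈ (pvD arr).getD t [], i ≠ j ∧ y = (min i j, max i j) := by
  by_cases hc : (pvD arr).contains t
  · rw [if_pos hc]
    exact mem_foldl_gen _ (fun j y => i ≠ j ∧ y = (min i j, max i j))
      (fun r j y => pvRes_step3 i r j y) _ r y
  · rw [if_neg hc]
    have h0 : (pvD arr).getD t [] = [] :=
      PySem.Dict.getD_of_not_contains _ [] (by simpa using hc)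
    simp [h0]

lemma mem_pvRes_raw (k : Int) (arr : List Int) (x : Int × Int) :
    x ∈ pvRes k arr ↔
      ∃ p ∈ PySem.List.enumerate arr 0, ∃ t ∈ [k - p.2, p.2 - k],
        ∃ j ∈ (pvD arr).getD t [], p.1 ≠ j ∧ x = (min p.1 j, max p.1 j) := by
  unfold pvRes
  rw [mem_foldl_gen _
    (fun p y => ∃ t ∈ [k - p.2, p.2 - k],
        ∃ j ∈ (pvD arr).getD t [], p.1 ≠ j ∧ y = (min p.1 j, max p.1 j))
    (fun r p y => mem_foldl_gen _
      (fun t y => ∃ j ∈ (pvD arr).getD t [], p.1 ≠ j ∧ y = (min p.1 j, max p.1 j))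
      (fun r t y => pvRes_step2 arr p.1 r t y) _ r y)
    _ _ x]
  simp [PySem.Set.empty]

lemma mem_pvRes (k : Int) (arr : List Int) (x : Int × Int) :
    x ∈ pvRes k arr ↔
      ∃ (i j : Nat) (hij : i < j) (hj : j < arr.length),
        pvPred k (arr[i]'(Nat.lt_trans hij hj)) (arr[j]'hj) = true ∧
        x = ((i : Int), (j : Int)) := by
  rw [mem_pvRes_raw]
  constructor
  · rintro ⟨p, hp, t, ht, j, hj, hne, rfl⟩
    rcases (PySem.List.mem_enumerate_iff _ _ _).mp hp with ⟨i, hi, rfl⟩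
    rcases (mem_pvD_getD arr t j).mp hj with ⟨m, hm, hmt, rfl⟩
    simp only [zero_add] at *
    have him : i ≠ m := by
      intro h; exact hne (by simp [h])
    have hval : arr[m] = k - arr[i] ∨ arr[m] = arr[i] - k := by
      simp only [List.mem_cons, List.not_mem_nil, or_false] at ht
      rcases ht with rfl | rfl
      · exact Or.inl hmt
      · exact Or.inr hmt
    rcases Nat.lt_or_ge i m with hlt | hge
    · refine ⟨i, m, hlt, hm, ?_, ?_⟩
      · simp only [pvPred, Bool.or_eq_true, beq_iff_eq]; omega
      · have h1 : min (i : Int) (m : Int) = (i : Int) := by omega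
        have h2 : max (i : Int) (m : Int) = (m : Int) := by omega
        rw [h1, h2]
    · have hlt : m < i := by omega
      refine ⟨m, i, hlt, hi, ?_, ?_⟩
      · simp only [pvPred, Bool.or_eq_true, beq_iff_eq]; omega
      · have h1 : min (i : Int) (m : Int) = (m : Int) := by omega
        have h2 : max (i : Int) (m : Int) = (i : Int) := by omega
        rw [h1, h2]
  · rintro ⟨i, j, hij, hj, hpred, rfl⟩
    have hi : i < arr.length := Nat.lt_trans hij hj
    have hP : (arr[i]'hi) + (arr[j]'hj) = k ∨ (arr[i]'hi) - (arr[j]'hj) = k ∨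
        (arr[j]'hj) - (arr[i]'hi) = k := by
      simpa only [pvPred, Bool.or_eq_true, beq_iff_eq, or_assoc] using hpred
    have hmini : min ((i : Int)) ((j : Int)) = (i : Int) := by omega
    have hmaxi : max ((i : Int)) ((j : Int)) = (j : Int) := by omega
    have hminj : min ((j : Int)) ((i : Int)) = (i : Int) := by omega
    have hmaxj : max ((j : Int)) ((i : Int)) = (j : Int) := by omega
    rcases hP with hsum | hdiff | hdiff'
    · refine ⟨((i : Int), arr[i]'hi),
        (PySem.List.mem_enumerate_iff _ _ _).mpr ⟨i, hi, by simp⟩,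
        k - arr[i]'hi, by simp,
        (j : Int), (mem_pvD_getD arr _ _).mpr ⟨j, hj, by omega, rfl⟩,
        by omega, ?_⟩
      rw [hmini, hmaxi]
    · refine ⟨((i : Int), arr[i]'hi),
        (PySem.List.mem_enumerate_iff _ _ _).mpr ⟨i, hi, by simp⟩,
        arr[i]'hi - k, by simp,
        (j : Int), (mem_pvD_getD arr _ _).mpr ⟨j, hj, by omega, rfl⟩,
        by omega, ?_⟩
      rw [hmini, hmaxi]
    · refine ⟨((j : Int), arr[j]'hj),
        (PySem.List.mem_enumerate_iff _ _ _).mpr ⟨j, hj, by simp⟩,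
        arr[j]'hj - k, by simp,
        (i : Int), (mem_pvD_getD arr _ _).mpr ⟨i, hi, by omega, rfl⟩,
        by omega, ?_⟩
      rw [hminj, hmaxj]

lemma nodup_pvRes (k : Int) (arr : List Int) : (pvRes k arr).Nodup := by
  unfold pvRes
  refine nodup_foldl_gen _ ?_ _ _ List.nodup_nil
  intro r p hr
  refine nodup_foldl_gen _ ?_ _ _ hr
  intro r t hr
  by_cases hc : (pvD arr).contains t
  · rw [if_pos hc]
    refine nodup_foldl_gen _ ?_ _ _ hr
    intro r j hr
    by_cases h : p.1 = j
    · simpa [h]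
    · rw [if_neg h]
      exact PySem.Set.nodup_add _ _ hr
  · simpa [hc]

lemma mem_pvM (k : Int) (s : Int) (arr : List Int) (x : Int × Int) :
    x ∈ pvM k s arr ↔
      ∃ (i j : Nat) (hij : i < j) (hj : j < arr.length),
        pvPred k (arr[i]'(Nat.lt_trans hij hj)) (arr[j]'hj) = true ∧
        x = (s + (i : Int), s + (j : Int)) := by
  induction arr generalizing s with
  | nil => simp [pvM]
  | cons a rest ih =>
      simp only [pvM, List.mem_append, List.mem_map, List.mem_filter, ih]
      constructor
      · rintro (⟨p, ⟨hp, hpred⟩, rfl⟩ | ⟨i, j, hij, hj, hpred, rfl⟩)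
        · rcases (PySem.List.mem_enumerate_iff _ _ _).mp hp with ⟨m, hm, rfl⟩
          refine ⟨0, m + 1, Nat.succ_pos m, by simpa using Nat.succ_lt_succ hm, ?_, ?_⟩
          · simpa using hpred
          · simp only [Prod.ext_iff]; push_cast; omega
        · refine ⟨i + 1, j + 1, Nat.succ_lt_succ hij, Nat.succ_lt_succ hj,
            by simpa using hpred, ?_⟩
          simp only [Prod.ext_iff]; push_cast; omega
      · rintro ⟨i, j, hij, hj, hpred, rfl⟩
        rcases i with _ | i
        · rcases j with _ | m
          · exact absurd hij (by omega)
          · have hj' : m < rest.length := by simpa using hj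
            left
            refine ⟨((s + 1) + (m : Int), rest[m]'hj'),
              ⟨(PySem.List.mem_enumerate_iff _ _ _).mpr ⟨m, hj', rfl⟩,
               by simpa using hpred⟩, ?_⟩
            simp only [Prod.ext_iff]; push_cast; omega
        · rcases j with _ | m
          · exact absurd hij (by omega)
          · have hj' : m < rest.length := by simpa using hj
            have hij' : i < m := by omega
            right
            refine ⟨i, m, hij', hj', by simpa using hpred, ?_⟩
            simp only [Prod.ext_iff]; push_cast; omega

lemma nodup_pvM (k : Int) (s : Int) (arr : List Int) : (pvM k s arr).Nodup := by
  induction arr generalizing s with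
  | nil => simp [pvM]
  | cons a rest ih =>
      refine List.Nodup.append ?_ (ih (s + 1)) ?_
      · refine List.pairwise_map.mpr ?_
        refine List.Pairwise.imp ?_
          (List.Pairwise.filter _ (PySem.List.pairwise_lt_enumerate rest (s + 1)))
        intro p q hpq
        simp only [ne_eq, Prod.mk.injEq, not_and]
        intro _ h2
        omega
      · intro x hx hx'
        rcases (mem_pvM k (s + 1) rest x).mp hx' with ⟨i, j, _, _, _, hx1⟩
        rcases List.mem_map.mp hx with ⟨p, _, hx2⟩
        rw [← hx2] at hx1
        have : (s : Int) = s + 1 + (i : Int) := congrArg Prod.fst hx1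
        omega

lemma go_eq_len_pvM (k : Int) (arr : List Int) :
    ∀ (s t : Int), pairs1AltGo k arr t = t + ((pvM k s arr).length : Int) := by
  induction arr with
  | nil => intro s t; simp [pairs1AltGo, pvM]
  | cons a rest ih =>
      intro s t
      have hcnt : (List.filter (fun p => pvPred k a p.2)
          (PySem.List.enumerate rest (s + 1))).length
          = rest.countP (fun b => a + b == k || a - b == k || b - a == k) := by
        rw [← List.countP_eq_length_filter]
        conv_rhs => rw [← PySem.List.map_snd_enumerate rest (s + 1)]
        rw [List.countP_map]
        rfl
      simp only [pairs1AltGo, pvM, List.length_append, List.length_map, hcnt]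
      rw [ih (s + 1)]
      push_cast
      ring

-- ===== VERDICT (by name: the statement is the Claim_ definition above) =====
theorem pairs1_spec : Claim_equal_pairs1 := by
  intro k arr _
  show pairs1 k arr = pairs1_alt k arr
  rw [pairs1_eq_res]
  have hperm : (pvRes k arr).Perm (pvM k 0 arr) := by
    rw [List.perm_ext_iff_of_nodup (nodup_pvRes k arr) (nodup_pvM k 0 arr)]
    intro x
    rw [mem_pvRes, mem_pvM]
    simp
  rw [hperm.length_eq]
  show _ = pairs1AltGo k arr 0
  rw [go_eq_len_pvM k arr 0 0]
  ring
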